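-- pv_equiv track=rewrite | github.com/AngRoy/Pubmed_Extractor | app.py | parse_month
-- ===== SOURCE A (Python) =====
-- def parse_month(mstr):
--     """Parse month from string (name or number)"""
--     if not mstr:
--         return 1
--
--     # If already numeric
--     if mstr.isdigit():
--         m = int(mstr)
--         return m if 1 <= m <= 12 else 1
--
--     # Handle month names and abbreviations
--     mstr = mstr.strip().lower()
--     month_map = {
--         'jan': 1, 'january': 1,
--         'feb': 2, 'february': 2,
--         'mar': 3, 'march': 3,
--         'apr': 4, 'april': 4,
--         'may': 5,
--         'jun': 6, 'june': 6,
--         'jul': 7, 'july': 7,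
--         'aug': 8, 'august': 8,
--         'sep': 9, 'september': 9, 'sept': 9,
--         'oct': 10, 'october': 10,
--         'nov': 11, 'november': 11,
--         'dec': 12, 'december': 12
--     }
--
--     for abbr, num in month_map.items():
--         if mstr.startswith(abbr):
--             return num
--
--     return 1  # Default to January if no match
-- ===== SOURCE B (Python) =====
-- _MONTHS = {'jan': 1, 'feb': 2, 'mar': 3, 'apr': 4, 'may': 5, 'jun': 6,
--            'jul': 7, 'aug': 8, 'sep': 9, 'oct': 10, 'nov': 11, 'dec': 12}
--
--
-- def parse_month(mstr):
--     """Parse month from string (name or number)"""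
--     if not mstr:
--         return 1
--     if mstr.isdigit():
--         m = int(mstr)
--         return m if 1 <= m <= 12 else 1
--     # every spelling's first three letters are its unique abbreviation
--     return _MONTHS.get(mstr.strip().lower()[:3], 1)
-- ===== Notes on version B (the rewrite author's own statement) =====
-- stated objective: simpler
-- what changed: Replaces the ordered 24-entry startswith prefix scan with a single hash lookup of the first three characters of the stripped lowercased string in a 12-entry abbreviation dict, exploiting that each month's 3-letter abbreviation is a prefix of all its spellings.
import Mathlib
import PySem

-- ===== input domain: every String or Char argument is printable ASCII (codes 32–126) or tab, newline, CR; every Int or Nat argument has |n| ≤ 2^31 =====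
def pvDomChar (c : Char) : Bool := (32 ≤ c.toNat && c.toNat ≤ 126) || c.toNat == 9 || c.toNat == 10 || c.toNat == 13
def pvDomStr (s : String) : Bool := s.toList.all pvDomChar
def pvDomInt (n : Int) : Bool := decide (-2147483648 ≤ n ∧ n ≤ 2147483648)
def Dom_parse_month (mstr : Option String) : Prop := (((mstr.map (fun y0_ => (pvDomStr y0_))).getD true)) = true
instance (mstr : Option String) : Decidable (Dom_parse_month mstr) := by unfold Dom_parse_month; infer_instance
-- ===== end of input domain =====

-- B replaces A's ordered 24-entry startswith scan with one 3-letter-key dict lookup; return value proved equal on the whole domain.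
-- ===== PORT A =====
def monthMapA : List (String × Int) :=
  [("jan", 1),
   ("january", 1),
   ("feb", 2),
   ("february", 2),
   ("mar", 3),
   ("march", 3),
   ("apr", 4),
   ("april", 4),
   ("may", 5),
   ("jun", 6),
   ("june", 6),
   ("jul", 7),
   ("july", 7),
   ("aug", 8),
   ("august", 8),
   ("sep", 9),
   ("september", 9),
   ("sept", 9),
   ("oct", 10),
   ("october", 10),
   ("nov", 11),
   ("november", 11),
   ("dec", 12),
   ("december", 12)]

def monthScan (t : String) : List (String × Int) → Int
  | [] => 1
  | (abbr, num) :: rest => if PySem.Str.startswith t abbr then num else monthScan t rest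

def parse_month (mstr : Option String) : Int :=
  match mstr with
  | none => 1
  | some s =>
    if s.toList = [] then 1
    else if PySem.Str.strIsdigit s then
      -- int(mstr): isdigit guarantees int() succeeds on the ASCII domain, so the default is never used
      let m := (PySem.Int.ofStr? s).getD 1
      if 1 ≤ m ∧ m ≤ 12 then m else 1
    else monthScan (PySem.Str.lower (PySem.Str.strip s)) monthMapA

-- ===== PORT B =====
def monthAbbrs : PySem.Dict String Int :=
  ⟨[("jan", 1), ("feb", 2), ("mar", 3), ("apr", 4), ("may", 5), ("jun", 6), ("jul", 7), ("aug", 8), ("sep", 9), ("oct", 10), ("nov", 11), ("dec", 12)]⟩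

def parse_month_alt (mstr : Option String) : Int :=
  match mstr with
  | none => 1
  | some s =>
    if s.toList = [] then 1
    else if PySem.Str.strIsdigit s then
      -- int(mstr): isdigit guarantees int() succeeds on the ASCII domain, so the default is never used
      let m := (PySem.Int.ofStr? s).getD 1
      if 1 ≤ m ∧ m ≤ 12 then m else 1
    else monthAbbrs.getD (PySem.Str.slice (PySem.Str.lower (PySem.Str.strip s)) none (some 3)) 1

-- ===== PRECONDITION & SPEC =====
def Spec_parse_month (mstr : Option String) (out : Int) : Prop := out = parse_month_alt mstr
instance (mstr : Option String) (out : Int) : Decidable (Spec_parse_month mstr out) := by unfold Spec_parse_month; infer_instance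

-- ===== CLAIM (what is proved, stated in full; the proofs are below) =====
def Claim_equal_parse_month : Prop := ∀ (mstr : Option String), Dom_parse_month mstr → Spec_parse_month mstr (parse_month mstr)

-- ===== LEMMAS AND PROOFS =====

-- the common value: month number from the first three characters
def month3 (k : List Char) : Int :=
  if "jan".toList = k then 1 else if "feb".toList = k then 2 else if "mar".toList = k then 3
  else if "apr".toList = k then 4 else if "may".toList = k then 5 else if "jun".toList = k then 6
  else if "jul".toList = k then 7 else if "aug".toList = k then 8 else if "sep".toList = k then 9
  else if "oct".toList = k then 10 else if "nov".toList = k then 11 else if "dec".toList = k then 12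
  else 1

theorem sw3 (t p : String) (hp : p.toList.length = 3) :
    PySem.Str.startswith t p = decide (p.toList = t.toList.take 3) := by
  by_cases hd : p.toList = t.toList.take 3
  · have hpre : p.toList <+: t.toList := List.prefix_iff_eq_take.mpr (by rw [hp]; exact hd)
    have h1 : PySem.Chars.startswith t.toList p.toList = true :=
      (PySem.Chars.startswith_iff _ _).mpr hpre
    rw [PySem.Str.startswith_eq, h1, decide_eq_true hd]
  · have hnp : ¬ p.toList <+: t.toList := fun h => hd (by
      have := List.prefix_iff_eq_take.mp h; rwa [hp] at this)
    have h1 : PySem.Chars.startswith t.toList p.toList = false := by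
      rw [Bool.eq_false_iff, Ne, PySem.Chars.startswith_iff]; exact hnp
    rw [PySem.Str.startswith_eq, h1, decide_eq_false hd]

theorem sw_false_of_short (t p : String) (q : List Char) (hq : q.length = 3)
    (hpq : q <+: p.toList) (h : ¬ q = t.toList.take 3) :
    PySem.Str.startswith t p = false := by
  rw [PySem.Str.startswith_eq, Bool.eq_false_iff, Ne, PySem.Chars.startswith_iff]
  intro hpre
  exact h (by have := List.prefix_iff_eq_take.mp (hpq.trans hpre); rwa [hq] at this)

theorem beq_str (s r : String) : (s == r) = decide (s.toList = r.toList) := by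
  by_cases h : s = r
  · subst h; simp
  · have h2 : ¬ s.toList = r.toList := fun hl => h (String.toList_inj.mp hl)
    rw [decide_eq_false h2]
    exact beq_eq_false_iff_ne.mpr h

theorem scanA_eq_month3 (t : String) : monthScan t monthMapA = month3 (t.toList.take 3) := by
  simp only [monthMapA, monthScan,
    sw3 t "jan" rfl, sw3 t "feb" rfl, sw3 t "mar" rfl, sw3 t "apr" rfl,
    sw3 t "may" rfl, sw3 t "jun" rfl, sw3 t "jul" rfl, sw3 t "aug" rfl,
    sw3 t "sep" rfl, sw3 t "oct" rfl, sw3 t "nov" rfl, sw3 t "dec" rfl]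
  by_cases h1 : ['j', 'a', 'n'] = t.toList.take 3
  · simp [h1, month3]
  rw [sw_false_of_short t "january" ['j', 'a', 'n'] rfl (by decide) h1]
  by_cases h2 : ['f', 'e', 'b'] = t.toList.take 3
  · simp [h2, month3]
  rw [sw_false_of_short t "february" ['f', 'e', 'b'] rfl (by decide) h2]
  by_cases h3 : ['m', 'a', 'r'] = t.toList.take 3
  · simp [h3, month3]
  rw [sw_false_of_short t "march" ['m', 'a', 'r'] rfl (by decide) h3]
  by_cases h4 : ['a', 'p', 'r'] = t.toList.take 3
  · simp [h4, month3]
  rw [sw_false_of_short t "april" ['a', 'p', 'r'] rfl (by decide) h4]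
  by_cases h5 : ['m', 'a', 'y'] = t.toList.take 3
  · simp [h5, month3]
  by_cases h6 : ['j', 'u', 'n'] = t.toList.take 3
  · simp [h6, month3]
  rw [sw_false_of_short t "june" ['j', 'u', 'n'] rfl (by decide) h6]
  by_cases h7 : ['j', 'u', 'l'] = t.toList.take 3
  · simp [h7, month3]
  rw [sw_false_of_short t "july" ['j', 'u', 'l'] rfl (by decide) h7]
  by_cases h8 : ['a', 'u', 'g'] = t.toList.take 3
  · simp [h8, month3]
  rw [sw_false_of_short t "august" ['a', 'u', 'g'] rfl (by decide) h8]
  by_cases h9 : ['s', 'e', 'p'] = t.toList.take 3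
  · simp [h9, month3]
  rw [sw_false_of_short t "september" ['s', 'e', 'p'] rfl (by decide) h9]
  rw [sw_false_of_short t "sept" ['s', 'e', 'p'] rfl (by decide) h9]
  by_cases h10 : ['o', 'c', 't'] = t.toList.take 3
  · simp [h10, month3]
  rw [sw_false_of_short t "october" ['o', 'c', 't'] rfl (by decide) h10]
  by_cases h11 : ['n', 'o', 'v'] = t.toList.take 3
  · simp [h11, month3]
  rw [sw_false_of_short t "november" ['n', 'o', 'v'] rfl (by decide) h11]
  by_cases h12 : ['d', 'e', 'c'] = t.toList.take 3
  · simp [h12, month3]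
  rw [sw_false_of_short t "december" ['d', 'e', 'c'] rfl (by decide) h12]
  simp [h1, h2, h3, h4, h5, h6, h7, h8, h9, h10, h11, h12, month3]

theorem lookupB_eq_month3 (k : String) :
    monthAbbrs.getD k 1 = month3 k.toList := by
  by_cases g1 : ['j', 'a', 'n'] = k.toList
  · have hk : k = "jan" := String.toList_inj.mp (by rw [← g1]; rfl)
    subst hk; decide
  by_cases g2 : ['f', 'e', 'b'] = k.toList
  · have hk : k = "feb" := String.toList_inj.mp (by rw [← g2]; rfl)
    subst hk; decide
  by_cases g3 : ['m', 'a', 'r'] = k.toList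
  · have hk : k = "mar" := String.toList_inj.mp (by rw [← g3]; rfl)
    subst hk; decide
  by_cases g4 : ['a', 'p', 'r'] = k.toList
  · have hk : k = "apr" := String.toList_inj.mp (by rw [← g4]; rfl)
    subst hk; decide
  by_cases g5 : ['m', 'a', 'y'] = k.toList
  · have hk : k = "may" := String.toList_inj.mp (by rw [← g5]; rfl)
    subst hk; decide
  by_cases g6 : ['j', 'u', 'n'] = k.toList
  · have hk : k = "jun" := String.toList_inj.mp (by rw [← g6]; rfl)
    subst hk; decide
  by_cases g7 : ['j', 'u', 'l'] = k.toList
  · have hk : k = "jul" := String.toList_inj.mp (by rw [← g7]; rfl)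
    subst hk; decide
  by_cases g8 : ['a', 'u', 'g'] = k.toList
  · have hk : k = "aug" := String.toList_inj.mp (by rw [← g8]; rfl)
    subst hk; decide
  by_cases g9 : ['s', 'e', 'p'] = k.toList
  · have hk : k = "sep" := String.toList_inj.mp (by rw [← g9]; rfl)
    subst hk; decide
  by_cases g10 : ['o', 'c', 't'] = k.toList
  · have hk : k = "oct" := String.toList_inj.mp (by rw [← g10]; rfl)
    subst hk; decide
  by_cases g11 : ['n', 'o', 'v'] = k.toList
  · have hk : k = "nov" := String.toList_inj.mp (by rw [← g11]; rfl)
    subst hk; decide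
  by_cases g12 : ['d', 'e', 'c'] = k.toList
  · have hk : k = "dec" := String.toList_inj.mp (by rw [← g12]; rfl)
    subst hk; decide
  simp [monthAbbrs, PySem.Dict.getD, PySem.Dict.get?, List.find?, beq_str, month3, g1, g2, g3, g4, g5, g6, g7, g8, g9, g10, g11, g12]

theorem parse_month_eq (mstr : Option String) : parse_month mstr = parse_month_alt mstr := by
  match mstr with
  | none => rfl
  | some s =>
    simp only [parse_month, parse_month_alt]
    by_cases he : s.toList = []
    · rw [if_pos he, if_pos he]
    · rw [if_neg he, if_neg he]
      by_cases hd : PySem.Str.strIsdigit s = true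
      · rw [if_pos hd, if_pos hd]
      · rw [if_neg hd, if_neg hd]
        rw [scanA_eq_month3, lookupB_eq_month3]
        have hkey : (PySem.Str.slice (PySem.Str.lower (PySem.Str.strip s)) none (some 3)).toList
            = (PySem.Str.lower (PySem.Str.strip s)).toList.take 3 := by
          rw [PySem.Str.toList_slice, PySem.Chars.slice_eq_listSlice,
            PySem.List.slice_to _ (by norm_num)]
          rfl
        rw [hkey]

-- ===== VERDICT (by name: the statement is the Claim_ definition above) =====
theorem parse_month_spec : Claim_equal_parse_month := by
  intro mstr _
  unfold Spec_parse_month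
  exact parse_month_eq mstr
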